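-- pv_equiv track=rewrite | github.com/h-albert-lee/toy-models-of-superposition | src/data_analysis.py | _detect_quality_issues
-- ===== SOURCE A (Python) =====
-- from typing import Dict, List, Tuple
--
-- def _detect_quality_issues(data: List[Dict]) -> Dict:
--     """Detect potential quality issues in the dataset."""
--     issues = {
--         "empty_texts": 0,
--         "very_short_texts": 0,
--         "very_long_texts": 0,
--         "duplicate_pairs": 0,
--         "identical_pairs": 0,
--         "missing_fields": 0
--     }
--
--     seen_pairs = set()
--
--     for item in data:
--         # Check for missing fields
--         if "toxic_text" not in item or "neutral_text" not in item:
--             issues["missing_fields"] += 1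
--             continue
--
--         toxic_text = item["toxic_text"]
--         neutral_text = item["neutral_text"]
--
--         # Empty texts
--         if not toxic_text.strip() or not neutral_text.strip():
--             issues["empty_texts"] += 1
--
--         # Very short texts
--         if len(toxic_text) < 10 or len(neutral_text) < 10:
--             issues["very_short_texts"] += 1
--
--         # Very long texts
--         if len(toxic_text) > 500 or len(neutral_text) > 500:
--             issues["very_long_texts"] += 1
--
--         # Identical pairs
--         if toxic_text.strip().lower() == neutral_text.strip().lower():
--             issues["identical_pairs"] += 1
--
--         # Duplicate pairs
--         pair_key = (toxic_text.strip().lower(), neutral_text.strip().lower())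
--         if pair_key in seen_pairs:
--             issues["duplicate_pairs"] += 1
--         else:
--             seen_pairs.add(pair_key)
--
--     return issues
-- ===== SOURCE B (Python) =====
-- from typing import Dict, List, Tuple
--
-- def _detect_quality_issues(data: List[Dict]) -> Dict:
--     """Detect potential quality issues: partition once, then one pass per metric."""
--     valid = [it for it in data if "toxic_text" in it and "neutral_text" in it]
--     empty = sum(1 for it in valid
--                 if not it["toxic_text"].strip() or not it["neutral_text"].strip())
--     short = sum(1 for it in valid
--                 if len(it["toxic_text"]) < 10 or len(it["neutral_text"]) < 10)
--     long_ = sum(1 for it in valid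
--                 if len(it["toxic_text"]) > 500 or len(it["neutral_text"]) > 500)
--     ident = sum(1 for it in valid
--                 if it["toxic_text"].strip().lower() == it["neutral_text"].strip().lower())
--     keys = [(it["toxic_text"].strip().lower(), it["neutral_text"].strip().lower())
--             for it in valid]
--     seen = set()
--     dup = 0
--     for k in keys:
--         if k in seen:
--             dup += 1
--         else:
--             seen.add(k)
--     return {
--         "empty_texts": empty,
--         "very_short_texts": short,
--         "very_long_texts": long_,
--         "duplicate_pairs": dup,
--         "identical_pairs": ident,
--         "missing_fields": len(data) - len(valid),
--     }
-- ===== Notes on version B (the rewrite author's own statement) =====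
-- stated objective: alternative
-- what changed: A keeps six counters and a seen-set mutated inside one loop; B partitions the data once into valid/missing items and then computes each metric by its own independent pass (comprehension-sums for four counters, a map to keys plus a separate set-scan for duplicates, and missing as len(data)-len(valid)).
import Mathlib
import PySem

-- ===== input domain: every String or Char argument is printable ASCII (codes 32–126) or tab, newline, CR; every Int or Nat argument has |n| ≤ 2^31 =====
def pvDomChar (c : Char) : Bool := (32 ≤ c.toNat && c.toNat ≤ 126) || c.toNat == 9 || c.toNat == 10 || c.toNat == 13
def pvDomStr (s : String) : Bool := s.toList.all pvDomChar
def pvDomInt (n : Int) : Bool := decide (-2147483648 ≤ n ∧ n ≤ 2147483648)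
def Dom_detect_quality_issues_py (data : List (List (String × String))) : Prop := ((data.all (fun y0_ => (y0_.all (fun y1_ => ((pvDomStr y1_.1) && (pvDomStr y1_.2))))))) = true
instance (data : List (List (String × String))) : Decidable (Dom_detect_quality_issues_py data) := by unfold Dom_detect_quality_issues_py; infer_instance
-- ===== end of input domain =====

-- B partitions the data once into valid/missing items and computes each counter by its own
-- independent pass, instead of A's single loop mutating six counters and a seen-set (alternative).


-- ===== PORT A =====
-- state of A's loop: the six counters of the issues dict plus the seen_pairs set
structure PvStA where
  e : Int
  s : Int
  l : Int
  d : Int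
  i : Int
  m : Int
  seen : PySem.Set (String × String)
  deriving Repr, DecidableEq

def pvStepA (st : PvStA) (item : List (String × String)) : PvStA :=
  match (PySem.Dict.mk item).get? "toxic_text", (PySem.Dict.mk item).get? "neutral_text" with
  | some t, some n =>
    let e := if PySem.Str.strip t = "" ∨ PySem.Str.strip n = "" then st.e + 1 else st.e
    let s := if PySem.Str.len t < 10 ∨ PySem.Str.len n < 10 then st.s + 1 else st.s
    let l := if PySem.Str.len t > 500 ∨ PySem.Str.len n > 500 then st.l + 1 else st.l
    let i := if PySem.Str.lower (PySem.Str.strip t) = PySem.Str.lower (PySem.Str.strip n)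
             then st.i + 1 else st.i
    let k := (PySem.Str.lower (PySem.Str.strip t), PySem.Str.lower (PySem.Str.strip n))
    if PySem.Set.contains st.seen k then
      ⟨e, s, l, st.d + 1, i, st.m, st.seen⟩
    else
      ⟨e, s, l, st.d, i, st.m, PySem.Set.add st.seen k⟩
  | _, _ => { st with m := st.m + 1 }

def detect_quality_issues_py (data : List (List (String × String))) : List (String × Int) :=
  let st := data.foldl pvStepA ⟨0, 0, 0, 0, 0, 0, PySem.Set.empty⟩
  [("empty_texts", st.e), ("very_short_texts", st.s), ("very_long_texts", st.l),
   ("duplicate_pairs", st.d), ("identical_pairs", st.i), ("missing_fields", st.m)]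

-- ===== PORT B =====
def pvHasBoth (item : List (String × String)) : Bool :=
  ((PySem.Dict.mk item).get? "toxic_text").isSome && ((PySem.Dict.mk item).get? "neutral_text").isSome

def pvT (item : List (String × String)) : String := ((PySem.Dict.mk item).get? "toxic_text").getD ""
def pvN (item : List (String × String)) : String := ((PySem.Dict.mk item).get? "neutral_text").getD ""

def pvIsEmptyPair (it : List (String × String)) : Bool :=
  decide (PySem.Str.strip (pvT it) = "" ∨ PySem.Str.strip (pvN it) = "")
def pvIsShortPair (it : List (String × String)) : Bool :=
  decide (PySem.Str.len (pvT it) < 10 ∨ PySem.Str.len (pvN it) < 10)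
def pvIsLongPair (it : List (String × String)) : Bool :=
  decide (PySem.Str.len (pvT it) > 500 ∨ PySem.Str.len (pvN it) > 500)
def pvKeyOf (it : List (String × String)) : String × String :=
  (PySem.Str.lower (PySem.Str.strip (pvT it)), PySem.Str.lower (PySem.Str.strip (pvN it)))
def pvIsIdentPair (it : List (String × String)) : Bool :=
  decide ((pvKeyOf it).1 = (pvKeyOf it).2)

-- the separate duplicate-counting pass over the list of normalised keys
def pvDupStep (st : Int × PySem.Set (String × String)) (k : String × String) :
    Int × PySem.Set (String × String) :=
  if PySem.Set.contains st.2 k then (st.1 + 1, st.2) else (st.1, PySem.Set.add st.2 k)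

def detect_quality_issues_py_alt (data : List (List (String × String))) : List (String × Int) :=
  let valid := data.filter pvHasBoth
  let empty : Int := valid.countP pvIsEmptyPair
  let short : Int := valid.countP pvIsShortPair
  let long : Int := valid.countP pvIsLongPair
  let ident : Int := valid.countP pvIsIdentPair
  let dup : Int := ((valid.map pvKeyOf).foldl pvDupStep (0, PySem.Set.empty)).1
  [("empty_texts", empty), ("very_short_texts", short), ("very_long_texts", long),
   ("duplicate_pairs", dup), ("identical_pairs", ident),
   ("missing_fields", (data.length : Int) - (valid.length : Int))]

-- ===== PRECONDITION & SPEC =====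
def Spec_detect_quality_issues_py (data : List (List (String × String))) (out : List (String × Int)) : Prop := out = detect_quality_issues_py_alt data
instance (data : List (List (String × String))) (out : List (String × Int)) : Decidable (Spec_detect_quality_issues_py data out) := by unfold Spec_detect_quality_issues_py; infer_instance

-- ===== CLAIM (what is proved, stated in full; the proofs are below) =====
def Claim_equal_detect_quality_issues_py : Prop := ∀ (data : List (List (String × String))), Dom_detect_quality_issues_py data → Spec_detect_quality_issues_py data (detect_quality_issues_py data)

-- ===== LEMMAS AND PROOFS =====

-- A's fold, from an arbitrary state, equals B's per-metric counts added onto that state;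
-- the duplicate/seen components evolve exactly as B's separate key pass.
theorem pvFoldA_char (data : List (List (String × String))) (st : PvStA) :
    data.foldl pvStepA st =
      { e := st.e + ((data.filter pvHasBoth).countP pvIsEmptyPair : Int),
        s := st.s + ((data.filter pvHasBoth).countP pvIsShortPair : Int),
        l := st.l + ((data.filter pvHasBoth).countP pvIsLongPair : Int),
        i := st.i + ((data.filter pvHasBoth).countP pvIsIdentPair : Int),
        m := st.m + ((data.countP (fun it => !pvHasBoth it)) : Int),
        d := (((data.filter pvHasBoth).map pvKeyOf).foldl pvDupStep (st.d, st.seen)).1,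
        seen := (((data.filter pvHasBoth).map pvKeyOf).foldl pvDupStep (st.d, st.seen)).2 } := by
  induction data generalizing st with
  | nil => simp
  | cons item rest ih =>
    by_cases hv : pvHasBoth item = true
    · rw [List.foldl_cons, ih]
      have hb : (((PySem.Dict.mk item).get? "toxic_text").isSome = true) ∧
          (((PySem.Dict.mk item).get? "neutral_text").isSome = true) := by
        simpa [pvHasBoth] using hv
      obtain ⟨t, ht⟩ := Option.isSome_iff_exists.mp hb.1
      obtain ⟨n, hn⟩ := Option.isSome_iff_exists.mp hb.2
      have hT : pvT item = t := by simp [pvT, ht]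
      have hN : pvN item = n := by simp [pvN, hn]
      simp only [pvStepA, ht, hn, List.filter_cons, hv, if_true, List.countP_cons,
        List.map_cons, List.foldl_cons, pvIsEmptyPair, pvIsShortPair, pvIsLongPair,
        pvIsIdentPair, pvKeyOf, hT, hN, decide_eq_true_eq]
      split_ifs <;>
        simp_all [pvDupStep, PvStA.mk.injEq] <;> omega
    · rw [List.foldl_cons, ih]
      have hA : pvStepA st item = { st with m := st.m + 1 } := by
        simp only [pvHasBoth, Bool.and_eq_true, Option.isSome_iff_exists, not_and_or] at hv
        push_neg at hv
        unfold pvStepA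
        rcases h1 : (PySem.Dict.mk item).get? "toxic_text" with _ | t <;>
          rcases h2 : (PySem.Dict.mk item).get? "neutral_text" with _ | n <;> simp_all
      rw [hA]
      simp [List.filter_cons, List.countP_cons, hv]
      omega

theorem pvCountP_not (data : List (List (String × String))) :
    ((data.countP (fun it => !pvHasBoth it)) : Int) =
      (data.length : Int) - ((data.filter pvHasBoth).length : Int) := by
  induction data with
  | nil => simp
  | cons item rest ih =>
    by_cases hv : pvHasBoth item = true <;>
      simp [List.countP_cons, List.filter_cons, hv] <;> omega

-- ===== VERDICT (by name: the statement is the Claim_ definition above) =====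
theorem detect_quality_issues_py_spec : Claim_equal_detect_quality_issues_py := by
  intro data _
  unfold Spec_detect_quality_issues_py detect_quality_issues_py detect_quality_issues_py_alt
  rw [pvFoldA_char]
  simp [pvCountP_not]
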